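-- pv_equiv track=rewrite | github.com/hqyang/BertTest | src/preprocess.py | make_dict_feature_vec
-- ===== SOURCE A (Python) =====
-- def make_dict_feature_vec(sentence: str, word_dict: list, max_gram: int): #-> list
--     if max_gram <= 1:
--         raise ValueError('max gram should be greater than 1')
--
--     if not sentence:
--         return []
--
--     res = []
--
--     # for each char,
--     for char_ind, char in enumerate(sentence):
--         char_res = [0]*(2*(max_gram - 1))
--         for rel_ind in range(1, max_gram):
--
--             if char_ind - rel_ind >= 0:
--                 if sentence[char_ind - rel_ind:char_ind + 1] in word_dict:
--                     char_res[2*(rel_ind - 1)] = 1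
--             if char_ind + rel_ind < len(sentence):
--                 if sentence[char_ind:char_ind + rel_ind + 1] in word_dict:
--                     char_res[2*(rel_ind) - 1] = 1
--         res.append(char_res)
--     return res
-- ===== SOURCE B (Python) =====
-- def make_dict_feature_vec(sentence: str, word_dict: list, max_gram: int):
--     if max_gram <= 1:
--         raise ValueError('max gram should be greater than 1')
--     if not sentence:
--         return []
--     n = len(sentence)
--     res = [[0] * (2 * (max_gram - 1)) for _ in range(n)]
--     # single enumeration of candidate substrings: each dict hit distributes
--     # a "follows" bit to its start char and a "precedes" bit to its end char
--     for s in range(n):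
--         for L in range(2, min(max_gram, n - s) + 1):
--             if sentence[s:s + L] in word_dict:
--                 res[s][2 * L - 3] = 1
--                 res[s + L - 1][2 * L - 4] = 1
--     return res
-- ===== Notes on version B (the rewrite author's own statement) =====
-- stated objective: alternative
-- what changed: Replaces A's per-character double scan (each char probing its left and right n-grams separately, so every substring is tested twice) with a single enumeration of all candidate substrings over a pre-allocated zero matrix, each dictionary hit distributing one feature bit to its start char and one to its end char.
import Mathlib
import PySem

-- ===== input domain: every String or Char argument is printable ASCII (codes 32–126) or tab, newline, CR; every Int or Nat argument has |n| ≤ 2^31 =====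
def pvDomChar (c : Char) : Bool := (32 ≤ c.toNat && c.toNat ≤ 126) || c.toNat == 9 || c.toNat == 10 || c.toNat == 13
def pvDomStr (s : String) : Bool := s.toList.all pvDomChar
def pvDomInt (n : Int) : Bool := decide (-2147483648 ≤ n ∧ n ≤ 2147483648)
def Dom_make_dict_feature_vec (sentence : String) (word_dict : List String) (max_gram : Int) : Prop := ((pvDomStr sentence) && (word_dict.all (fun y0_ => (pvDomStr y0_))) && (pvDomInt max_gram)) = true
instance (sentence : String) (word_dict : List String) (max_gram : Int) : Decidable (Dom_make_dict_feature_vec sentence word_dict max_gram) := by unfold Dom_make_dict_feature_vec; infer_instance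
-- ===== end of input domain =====

-- B replaces A's per-char left/right probing (each substring tested twice) by a single
-- enumeration of candidate substrings that distributes two feature bits per dictionary hit.


-- ===== PORT A =====
def make_dict_feature_vec (sentence : String) (word_dict : List String) (max_gram : Int) : List (List Int) :=
  if max_gram ≤ 1 then []  -- Python raises ValueError here; excluded by Pre_
  else
    let cs := sentence.toList
    if cs = [] then []
    else
      let ws := word_dict.map String.toList
      (PySem.List.enumerate cs 0).map (fun ic =>
        let i := ic.1
        (PySem.List.pyRange 1 max_gram 1).foldl (fun char_res rel =>
          let char_res :=
            if 0 ≤ i - rel ∧ ws.contains (PySem.List.slice cs (some (i - rel)) (some (i + 1))) then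
              PySem.List.pySetD char_res (2 * (rel - 1)) 1
            else char_res
          if i + rel < (cs.length : Int) ∧ ws.contains (PySem.List.slice cs (some i) (some (i + rel + 1))) then
            PySem.List.pySetD char_res (2 * rel - 1) 1
          else char_res)
          (List.replicate (2 * (max_gram - 1)).toNat (0 : Int)))

-- ===== PORT B =====
-- res[s][c] = 1 is ported as List.modify s.toNat (row ↦ pySetD row c 1): exact for the
-- in-range indices 0 ≤ s < n the loop produces.
def make_dict_feature_vec_alt (sentence : String) (word_dict : List String) (max_gram : Int) : List (List Int) :=
  if max_gram ≤ 1 then []  -- Python raises ValueError here; excluded by Pre_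
  else
    let cs := sentence.toList
    if cs = [] then []
    else
      let ws := word_dict.map String.toList
      let n : Int := cs.length
      (PySem.List.pyRange 0 n 1).foldl (fun res s =>
        (PySem.List.pyRange 2 (min max_gram (n - s) + 1) 1).foldl (fun res L =>
          if ws.contains (PySem.List.slice cs (some s) (some (s + L))) then
            let res := res.modify s.toNat (fun row => PySem.List.pySetD row (2 * L - 3) 1)
            res.modify (s + L - 1).toNat (fun row => PySem.List.pySetD row (2 * L - 4) 1)
          else res) res)
        (List.replicate cs.length (List.replicate (2 * (max_gram - 1)).toNat (0 : Int)))

-- ===== PRECONDITION & SPEC =====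
-- Pre_ excludes exactly max_gram ≤ 1, where the Python A raises ValueError (B raises too).
def Pre_make_dict_feature_vec (sentence : String) (word_dict : List String) (max_gram : Int) : Prop := 1 < max_gram
instance (sentence : String) (word_dict : List String) (max_gram : Int) : Decidable (Pre_make_dict_feature_vec sentence word_dict max_gram) := by unfold Pre_make_dict_feature_vec; infer_instance
def pvWitness_make_dict_feature_vec : String × List String × Int := ("ab", ["ab"], 2)

def Spec_make_dict_feature_vec (sentence : String) (word_dict : List String) (max_gram : Int) (out : List (List Int)) : Prop := out = make_dict_feature_vec_alt sentence word_dict max_gram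
instance (sentence : String) (word_dict : List String) (max_gram : Int) (out : List (List Int)) : Decidable (Spec_make_dict_feature_vec sentence word_dict max_gram out) := by unfold Spec_make_dict_feature_vec; infer_instance

-- ===== CLAIM (what is proved, stated in full; the proofs are below) =====
def Claim_equal_make_dict_feature_vec : Prop := ∀ (sentence : String) (word_dict : List String) (max_gram : Int), Dom_make_dict_feature_vec sentence word_dict max_gram → Pre_make_dict_feature_vec sentence word_dict max_gram → Spec_make_dict_feature_vec sentence word_dict max_gram (make_dict_feature_vec sentence word_dict max_gram)

-- ===== LEMMAS AND PROOFS =====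

-- one conditional point-write of 1 into a row
def pvStep1 (v : List Int) (u : Nat × Bool) : List Int := if u.2 then v.set u.1 1 else v
-- one conditional point-write of 1 into a matrix
def pvStep2 (m : List (List Int)) (u : Nat × Nat × Bool) : List (List Int) :=
  if u.2.2 then m.modify u.1 (fun row => row.set u.2.1 1) else m
-- the updates a 2D write-list makes to row i
def pvProj (i : Nat) (ups : List (Nat × Nat × Bool)) : List (Nat × Bool) :=
  ups.filterMap (fun u => if u.1 = i then some (u.2.1, u.2.2) else none)

theorem pvStep1_getElem? (ups : List (Nat × Bool)) (v : List Int) (j : Nat) :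
    (ups.foldl pvStep1 v)[j]? = if (j, true) ∈ ups ∧ j < v.length then some 1 else v[j]? := by
  induction ups generalizing v with
  | nil => simp
  | cons u rest ih =>
    obtain ⟨p, b⟩ := u
    simp only [List.foldl_cons, ih]
    unfold pvStep1
    rcases b with _ | _
    · simp only [Bool.false_eq_true, if_false]
      have hm : ((j, true) ∈ (p, false) :: rest) ↔ (j, true) ∈ rest := by simp
      simp only [hm]
    · simp only [if_true, List.length_set, List.getElem?_set]
      have hm : ((j, true) ∈ (p, true) :: rest) ↔ (j = p ∨ (j, true) ∈ rest) := by
        simp [Prod.ext_iff, eq_comm]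
      simp only [hm]
      by_cases hj : j < v.length
      · by_cases hmem : (j, true) ∈ rest
        · rw [if_pos ⟨hmem, hj⟩, if_pos ⟨Or.inr hmem, hj⟩]
        · by_cases hp : p = j
          · subst hp
            rw [if_neg (fun hc => hmem hc.1), if_pos rfl, if_pos hj, if_pos ⟨Or.inl rfl, hj⟩]
          · rw [if_neg (fun hc => hmem hc.1), if_neg hp,
              if_neg (fun hc => hc.1.elim (fun h => hp h.symm) hmem)]
      · have hn : v[j]? = none := List.getElem?_eq_none_iff.mpr (by omega)
        by_cases hp : p = j
        · subst hp
          rw [if_neg (fun hc => hj hc.2), if_pos rfl, if_neg hj, if_neg (fun hc => hj hc.2), hn]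
        · rw [if_neg (fun hc => hj hc.2), if_neg hp, if_neg (fun hc => hj hc.2)]

theorem pvStep2_getElem? (ups : List (Nat × Nat × Bool)) (m : List (List Int)) (i : Nat) :
    (ups.foldl pvStep2 m)[i]? = m[i]?.map (fun row => (pvProj i ups).foldl pvStep1 row) := by
  induction ups generalizing m with
  | nil => simp [pvProj]
  | cons u rest ih =>
    obtain ⟨r, c, b⟩ := u
    simp only [List.foldl_cons, ih]
    have hproj : pvProj i ((r, c, b) :: rest) =
        if r = i then (c, b) :: pvProj i rest else pvProj i rest := by
      simp only [pvProj, List.filterMap_cons]; split <;> simp_all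
    rw [hproj]
    unfold pvStep2
    by_cases hr : r = i
    · rcases b with _ | _
      · simp only [Bool.false_eq_true, if_false, if_pos hr, List.foldl_cons]
        cases m[i]? <;> simp [pvStep1]
      · simp only [if_true, if_pos hr, List.foldl_cons, hr, List.getElem?_modify]
        cases m[i]? <;> simp [pvStep1]
    · rcases b with _ | _
      · simp [hr]
      · simp only [if_true, if_neg hr, List.getElem?_modify]
        cases m[i]? <;> simp [hr]

theorem pvFoldl_two {α : Type} (l : List α) (u1 u2 : α → Nat × Bool) (v : List Int) :
    l.foldl (fun acc x => pvStep1 (pvStep1 acc (u1 x)) (u2 x)) v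
      = (l.flatMap (fun x => [u1 x, u2 x])).foldl pvStep1 v := by
  induction l generalizing v with
  | nil => rfl
  | cons x xs ih => simp [ih]

theorem pvFoldl_two2 {α : Type} (l : List α) (u1 u2 : α → Nat × Nat × Bool) (v : List (List Int)) :
    l.foldl (fun acc x => pvStep2 (pvStep2 acc (u1 x)) (u2 x)) v
      = (l.flatMap (fun x => [u1 x, u2 x])).foldl pvStep2 v := by
  induction l generalizing v with
  | nil => rfl
  | cons x xs ih => simp [ih]

theorem pvFoldl_foldl_flatMap {α β γ : Type} (l : List α) (g : α → List β) (h : γ → β → γ) (init : γ) :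
    l.foldl (fun acc x => (g x).foldl h acc) init = (l.flatMap g).foldl h init := by
  induction l generalizing init with
  | nil => rfl
  | cons x xs ih => simp [ih]

theorem pvIf_set (P : Prop) [Decidable P] (v : List Int) (p : Nat) :
    (if P then v.set p 1 else v) = pvStep1 v (p, decide P) := by
  unfold pvStep1; by_cases h : P <;> simp [h]

-- the A-side update list for row i
def pvUpdsA (cs : List Char) (ws : List (List Char)) (max_gram : Int) (i : Int) : List (Nat × Bool) :=
  (PySem.List.pyRange 1 max_gram 1).flatMap (fun rel =>
    [((2 * (rel - 1)).toNat, decide (0 ≤ i - rel ∧ ws.contains (PySem.List.slice cs (some (i - rel)) (some (i + 1))))),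
     ((2 * rel - 1).toNat, decide (i + rel < (cs.length : Int) ∧ ws.contains (PySem.List.slice cs (some i) (some (i + rel + 1)))))])

-- the B-side update list
def pvUpdsB (cs : List Char) (ws : List (List Char)) (max_gram : Int) : List (Nat × Nat × Bool) :=
  (PySem.List.pyRange 0 (cs.length : Int) 1).flatMap (fun s =>
    (PySem.List.pyRange 2 (min max_gram ((cs.length : Int) - s) + 1) 1).flatMap (fun L =>
      [(s.toNat, (2 * L - 3).toNat, ws.contains (PySem.List.slice cs (some s) (some (s + L)))),
       ((s + L - 1).toNat, (2 * L - 4).toNat, ws.contains (PySem.List.slice cs (some s) (some (s + L))))]))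

-- the two update lists touch the same (row, column) cells with the same conditions
theorem pvUpds_iff (cs : List Char) (ws : List (List Char)) (max_gram : Int)
    (i j : Nat) (hi : i < cs.length) :
    (j, true) ∈ pvUpdsA cs ws max_gram (i : Int) ↔ ((i : Nat), j, true) ∈ pvUpdsB cs ws max_gram := by
  unfold pvUpdsA pvUpdsB
  simp only [List.mem_flatMap, PySem.List.mem_pyRange_one, List.mem_cons,
    List.not_mem_nil, or_false, Prod.mk.injEq, Bool.true_eq, decide_eq_true_eq]
  constructor
  · rintro ⟨rel, ⟨h1, h2⟩, (⟨hj, hc⟩ | ⟨hj, hc⟩)⟩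
    · -- left feature of char i: substring starts at i - rel, ends at i
      obtain ⟨hge, hmem⟩ := hc
      refine ⟨(i : Int) - rel, ⟨by omega, by omega⟩, rel + 1, ⟨by omega, by omega⟩, Or.inr ⟨by omega, by omega, ?_⟩⟩
      have harg : (i : Int) - rel + (rel + 1) = (i : Int) + 1 := by ring
      rw [harg]; exact hmem
    · -- right feature of char i: substring starts at i, length rel + 1
      obtain ⟨hlt, hmem⟩ := hc
      refine ⟨(i : Int), ⟨by omega, by omega⟩, rel + 1, ⟨by omega, by omega⟩, Or.inl ⟨by omega, by omega, ?_⟩⟩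
      have harg : (i : Int) + (rel + 1) = (i : Int) + rel + 1 := by ring
      rw [harg]; exact hmem
  · rintro ⟨s, ⟨hs0, hsn⟩, L, ⟨hL2, hLb⟩, (⟨hsi, hj, hc⟩ | ⟨hsi, hj, hc⟩)⟩
    · -- start-char descriptor: this is row s's right feature, rel = L - 1
      refine ⟨L - 1, ⟨by omega, by omega⟩, Or.inr ⟨by omega, ⟨by omega, ?_⟩⟩⟩
      have harg : (i : Int) + (L - 1) + 1 = s + L := by omega
      have hieq : (i : Int) = s := by omega
      rw [harg, hieq]; exact hc
    · -- end-char descriptor: this is row s+L-1's left feature, rel = L - 1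
      refine ⟨L - 1, ⟨by omega, by omega⟩, Or.inl ⟨by omega, ⟨by omega, ?_⟩⟩⟩
      have h1 : (i : Int) - (L - 1) = s := by omega
      have h2 : (i : Int) + 1 = s + L := by omega
      rw [h1, h2]; exact hc

-- A's result written as per-row 1D update folds
theorem pvA_eq (sentence : String) (word_dict : List String) (max_gram : Int) (h : ¬ max_gram ≤ 1)
    (hne : ¬ sentence.toList = []) :
    make_dict_feature_vec sentence word_dict max_gram
      = (PySem.List.enumerate sentence.toList 0).map (fun ic =>
          (pvUpdsA sentence.toList (word_dict.map String.toList) max_gram ic.1).foldl pvStep1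
            (List.replicate (2 * (max_gram - 1)).toNat (0 : Int))) := by
  unfold make_dict_feature_vec
  rw [if_neg h]
  simp only [if_neg hne]
  apply List.map_congr_left
  intro ic hic
  unfold pvUpdsA
  rw [← pvFoldl_two]
  apply PySem.List.foldl_congr_mem
  intro acc rel hrel
  rw [PySem.List.mem_pyRange_one] at hrel
  have e1 : PySem.List.pySetD acc (2 * (rel - 1)) (1 : Int) = acc.set (2 * (rel - 1)).toNat 1 :=
    PySem.List.pySetD_of_nonneg _ _ (by omega)
  have e2 : ∀ v : List Int, PySem.List.pySetD v (2 * rel - 1) (1 : Int) = v.set (2 * rel - 1).toNat 1 :=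
    fun v => PySem.List.pySetD_of_nonneg _ _ (by omega)
  simp only [e1, e2, pvIf_set]

-- B's result written as one flat 2D update fold
theorem pvB_eq (sentence : String) (word_dict : List String) (max_gram : Int) (h : ¬ max_gram ≤ 1)
    (hne : ¬ sentence.toList = []) :
    make_dict_feature_vec_alt sentence word_dict max_gram
      = (pvUpdsB sentence.toList (word_dict.map String.toList) max_gram).foldl pvStep2
          (List.replicate sentence.toList.length (List.replicate (2 * (max_gram - 1)).toNat (0 : Int))) := by
  unfold make_dict_feature_vec_alt
  rw [if_neg h]
  simp only [if_neg hne]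
  unfold pvUpdsB
  rw [← pvFoldl_foldl_flatMap]
  apply PySem.List.foldl_congr_mem
  intro acc s hs
  rw [← pvFoldl_two2]
  apply PySem.List.foldl_congr_mem
  intro acc2 L hL
  rw [PySem.List.mem_pyRange_one] at hL
  unfold pvStep2
  have e1 : ∀ row : List Int, PySem.List.pySetD row (2 * L - 3) (1 : Int) = row.set (2 * L - 3).toNat 1 :=
    fun row => PySem.List.pySetD_of_nonneg _ _ (by omega)
  have e2 : ∀ row : List Int, PySem.List.pySetD row (2 * L - 4) (1 : Int) = row.set (2 * L - 4).toNat 1 :=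
    fun row => PySem.List.pySetD_of_nonneg _ _ (by omega)
  simp only [e1, e2]
  by_cases hc : (word_dict.map String.toList).contains (PySem.List.slice sentence.toList (some s) (some (s + L))) = true
  · simp only [hc, if_true]
  · simp only [Bool.not_eq_true] at hc
    simp only [hc, Bool.false_eq_true, if_false]

-- ===== VERDICT (by name: the statement is the Claim_ definition above) =====
theorem make_dict_feature_vec_spec : Claim_equal_make_dict_feature_vec := by
  intro sentence word_dict max_gram _hdom hpre
  unfold Spec_make_dict_feature_vec
  have h : ¬ max_gram ≤ 1 := by unfold Pre_make_dict_feature_vec at hpre; omega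
  by_cases hne : sentence.toList = []
  · unfold make_dict_feature_vec make_dict_feature_vec_alt
    rw [if_neg h, if_neg h]
    simp [hne]
  · rw [pvA_eq sentence word_dict max_gram h hne, pvB_eq sentence word_dict max_gram h hne]
    apply List.ext_getElem?
    intro i
    rw [pvStep2_getElem?]
    by_cases hi : i < sentence.toList.length
    · rw [List.getElem?_map, PySem.List.getElem?_enumerate,
        List.getElem?_eq_getElem hi, List.getElem?_replicate, if_pos hi]
      simp only [Option.map_some]
      congr 1
      apply List.ext_getElem?
      intro j
      rw [pvStep1_getElem?, pvStep1_getElem?]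
      have hiff := pvUpds_iff sentence.toList (word_dict.map String.toList) max_gram i j hi
      have hmem : ((j, true) ∈ pvProj i (pvUpdsB sentence.toList (word_dict.map String.toList) max_gram))
          ↔ ((i : Nat), j, true) ∈ pvUpdsB sentence.toList (word_dict.map String.toList) max_gram := by
        unfold pvProj
        simp only [List.mem_filterMap]
        constructor
        · rintro ⟨⟨r, c, b⟩, hmem2, heq⟩
          by_cases hr : r = i
          · subst hr
            rw [if_pos rfl] at heq
            have h' : (c, b) = (j, true) := Option.some.inj heq
            injection h' with h1 h2
            subst h1; subst h2
            exact hmem2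
          · rw [if_neg hr] at heq
            exact absurd heq (by simp)
        · intro hmem2
          exact ⟨((i : Nat), j, true), hmem2, by simp⟩
      have hzero : (0 : Int) + (i : Int) = (i : Int) := by ring
      simp only [hzero, hmem, ← hiff]
    · rw [List.getElem?_map, PySem.List.getElem?_enumerate]
      rw [List.getElem?_eq_none_iff.mpr (by simpa using hi),
        List.getElem?_eq_none_iff.mpr (by simpa using hi)]
      rfl
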